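/- GENERATED by farm/mkstatement.py — do not edit. EVERY unit statement of the proof farm, imported together: this module
   compiles iff every statement compiles and no two units define the same name (9 units, one namespace each). -/
import Toy.Spec.Units.asan_register_globals
import Toy.Spec.Units.sub_I_65535_1
import Toy.Spec.Units.run_ctors
import Toy.Spec.Units.clamp_length
import Toy.Spec.Units.weighted_sum
import Toy.Spec.Units.store_sum
import Toy.Spec.Units.fill_buffer
import Toy.Spec.Units.prog_main
import Toy.Spec.Units.start
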